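-- pv_equiv track=rewrite | github.com/ZhivkoTringov/SoftUni---Software-Engineering-program | Python - Fundamentals/04. Functions - Exercise/08. Palindrome Integers.py | palindrome_nums
-- ===== SOURCE A (Python) =====
-- def palindrome_nums(nums):
--     res = []
--     for polindrome in nums:
--         if polindrome == polindrome[::-1]:
--             result = 'True'
--             res.append(result)
--         else:
--             result = 'False'
--             res.append(result)
--     return res
-- ===== SOURCE B (Python) =====
-- def _check(s):
--     i, j = 0, len(s) - 1
--     while i < j:
--         if s[i] != s[j]:
--             return 'False'
--         i += 1
--         j -= 1
--     return 'True'
--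
--
-- def palindrome_nums(nums):
--     return [_check(s) for s in nums]
-- ===== Notes on version B (the rewrite author's own statement) =====
-- stated objective: alternative
-- what changed: Replaces A's materialised full-reversal comparison with a two-pointer inward scan per string that short-circuits on the first mismatch, and builds the output by a comprehension over a helper instead of an accumulator loop.
import Mathlib
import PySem

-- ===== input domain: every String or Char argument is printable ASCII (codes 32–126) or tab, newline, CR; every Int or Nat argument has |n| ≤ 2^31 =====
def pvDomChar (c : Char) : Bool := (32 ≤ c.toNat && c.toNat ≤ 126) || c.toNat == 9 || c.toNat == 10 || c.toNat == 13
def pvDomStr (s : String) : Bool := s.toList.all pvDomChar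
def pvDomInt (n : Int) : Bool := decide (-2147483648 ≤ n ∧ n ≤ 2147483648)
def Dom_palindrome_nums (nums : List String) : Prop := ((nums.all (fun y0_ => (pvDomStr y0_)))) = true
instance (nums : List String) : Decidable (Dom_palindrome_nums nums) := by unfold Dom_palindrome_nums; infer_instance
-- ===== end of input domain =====

-- B replaces A's full-reversal comparison with a short-circuiting two-pointer scan; same outputs, similar cost.

-- ===== PORT A =====
-- literal port: res = []; for p in nums: append 'True' if p == p[::-1] else 'False'
def palindrome_nums (nums : List String) : List String :=
  nums.foldl (fun res polindrome =>
    if some polindrome = PySem.Str.slice? polindrome none none (-1) then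
      res ++ ["True"]
    else
      res ++ ["False"]) []

-- ===== PORT B =====
-- two-pointer inward scan: i from the left, j from the right, stop at first mismatch
def pvCheck (cs : List Char) (i j : Nat) : Bool :=
  if i < j then
    if cs.getD i ' ' ≠ cs.getD j ' ' then false
    else pvCheck cs (i + 1) (j - 1)
  else true
termination_by j - i

def palindrome_nums_alt (nums : List String) : List String :=
  nums.map (fun s => if pvCheck s.toList 0 (s.toList.length - 1) then "True" else "False")

-- ===== PRECONDITION & SPEC =====
def Spec_palindrome_nums (nums : List String) (out : List String) : Prop := out = palindrome_nums_alt nums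
instance (nums : List String) (out : List String) : Decidable (Spec_palindrome_nums nums out) := by unfold Spec_palindrome_nums; infer_instance

-- ===== CLAIM (what is proved, stated in full; the proofs are below) =====
def Claim_equal_palindrome_nums : Prop := ∀ (nums : List String), Dom_palindrome_nums nums → Spec_palindrome_nums nums (palindrome_nums nums)

-- ===== LEMMAS AND PROOFS =====

-- the two-pointer loop checks the mirror property on the window [i, j]
theorem pvCheck_iff (cs : List Char) (i j : Nat) :
    pvCheck cs i j = true ↔ ∀ k, i ≤ k → k ≤ j → cs.getD k ' ' = cs.getD (i + j - k) ' ' := by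
  induction i, j using pvCheck.induct cs with
  | case1 i j hlt hne =>
      rw [pvCheck]
      simp only [if_pos hlt, if_pos hne]
      constructor
      · intro h; exact absurd h (by simp)
      · intro h
        exact absurd (h i le_rfl (le_of_lt hlt)) (by simpa using hne)
  | case2 i j hlt hne ih =>
      rw [pvCheck]
      simp only [if_pos hlt, if_neg hne]
      push Not at hne
      rw [ih]
      constructor
      · intro h k hik hkj
        rcases eq_or_lt_of_le hik with rfl | hik'
        · simpa using hne
        · rcases eq_or_lt_of_le hkj with rfl | hkj'
          · have : i + k - k = i := by omega
            rw [this]; exact hne.symm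
          · have := h k (by omega) (by omega)
            have e : i + 1 + (j - 1) - k = i + j - k := by omega
            rwa [e] at this
      · intro h k hik hkj
        have := h k (by omega) (by omega)
        have e : i + j - k = i + 1 + (j - 1) - k := by omega
        rwa [e] at this
  | case3 i j hge =>
      rw [pvCheck]
      simp only [if_neg hge, true_iff]
      intro k hik hkj
      have e : i + j - k = k := by omega
      rw [e]

-- the mirror property on [0, n-1] is exactly reversal-equality
theorem pvCheck_eq_reverse (cs : List Char) :
    pvCheck cs 0 (cs.length - 1) = true ↔ cs = cs.reverse := by
  rw [pvCheck_iff]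
  constructor
  · intro h
    apply List.ext_getElem (by simp)
    intro k hk hk'
    have := h k (Nat.zero_le _) (by omega)
    have e1 : (0 : Nat) + (cs.length - 1) - k = cs.length - 1 - k := by omega
    rw [e1] at this
    rw [List.getElem_reverse]
    have g1 : cs.getD k ' ' = cs[k] := List.getD_eq_getElem cs ' ' hk
    have g2 : cs.getD (cs.length - 1 - k) ' ' = cs[cs.length - 1 - k] :=
      List.getD_eq_getElem cs ' ' (by omega)
    rw [g1, g2] at this
    exact this
  · intro h k _ hkj
    rcases Nat.eq_zero_or_pos cs.length with hn | hn
    · have : cs = [] := List.eq_nil_of_length_eq_zero hn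
      subst this; simp
    · have hk : k < cs.length := by omega
      have e1 : (0 : Nat) + (cs.length - 1) - k = cs.length - 1 - k := by omega
      have hq : cs[k]? = cs.reverse[k]? := by conv_lhs => rw [h]
      have hr : cs.reverse[k]? = some cs[cs.length - 1 - k] := by
        rw [List.getElem?_reverse (by simpa using hk), List.getElem?_eq_getElem (by omega)]
      rw [List.getElem?_eq_getElem hk] at hq
      rw [hr] at hq
      rw [e1, List.getD_eq_getElem cs ' ' hk, List.getD_eq_getElem cs ' ' (by omega)]
      exact Option.some.inj hq

-- per-string agreement between A's test and B's helper result
theorem per_string (s : String) :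
    (if some s = PySem.Str.slice? s none none (-1) then "True" else "False")
      = (if pvCheck s.toList 0 (s.toList.length - 1) then "True" else "False") := by
  have hs : (some s = PySem.Str.slice? s none none (-1)) ↔
      pvCheck s.toList 0 (s.toList.length - 1) = true := by
    rw [PySem.Str.slice?_none_none_neg_one, pvCheck_eq_reverse]
    constructor
    · intro h
      have := congrArg (fun o => (o.map String.toList).getD []) h
      simpa using this
    · intro h
      simp only [Option.some.injEq]
      rw [← h]
      simp
  split_ifs with h1 h2 h2 <;> simp_all

-- A's foldl-with-append builds the same list as B's map
theorem foldl_append_map (nums : List String) (acc : List String) :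
    nums.foldl (fun res polindrome =>
      if some polindrome = PySem.Str.slice? polindrome none none (-1) then
        res ++ ["True"]
      else
        res ++ ["False"]) acc
    = acc ++ nums.map (fun s => if pvCheck s.toList 0 (s.toList.length - 1) then "True" else "False") := by
  induction nums generalizing acc with
  | nil => simp
  | cons s rest ih =>
      simp only [List.foldl_cons, List.map_cons]
      rw [ih]
      have := per_string s
      split_ifs at this ⊢ <;> simp_all

-- ===== VERDICT (by name: the statement is the Claim_ definition above) =====
theorem palindrome_nums_spec : Claim_equal_palindrome_nums := by
  intro nums _
  unfold Spec_palindrome_nums palindrome_nums palindrome_nums_alt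
  simpa using foldl_append_map nums []
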